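-- pv_equiv track=rewrite | github.com/davidc6/coding-challenges-py | arrays/find_one.py | find_one
-- ===== SOURCE A (Python) =====
-- def find_one (A):
--     num_count = {}
--
--     for x in A:
--         if x in num_count:
--             num_count[x] += 1
--         else:
--             num_count[x] = 1
--
--     for k,v in num_count.items():
--         if v == 1:
--             return k
-- ===== SOURCE B (Python) =====
-- def find_one(A):
--     while A:
--         x, rest = A[0], A[1:]
--         if x not in rest:
--             return x
--         A = [y for y in rest if y != x]
--     return None
-- ===== Notes on version B (the rewrite author's own statement) =====
-- stated objective: alternative
-- what changed: Replaces the frequency-dictionary build plus dict scan with a peel loop: repeatedly test whether the current head reappears in the rest, returning it if unique and otherwise filtering out all its occurrences and continuing on the shrunken list.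
import Mathlib
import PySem

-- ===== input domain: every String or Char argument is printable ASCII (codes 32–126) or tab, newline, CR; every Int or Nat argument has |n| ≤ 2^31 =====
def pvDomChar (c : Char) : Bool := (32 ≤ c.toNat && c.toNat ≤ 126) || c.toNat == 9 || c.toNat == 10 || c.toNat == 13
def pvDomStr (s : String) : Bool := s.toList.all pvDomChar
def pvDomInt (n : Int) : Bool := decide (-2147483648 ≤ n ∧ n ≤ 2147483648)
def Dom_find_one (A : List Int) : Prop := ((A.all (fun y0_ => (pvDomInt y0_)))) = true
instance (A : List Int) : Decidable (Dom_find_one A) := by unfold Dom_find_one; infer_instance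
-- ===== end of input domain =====

-- B replaces A's frequency dictionary + dict scan by a peel loop: if the head reappears in the rest,
-- filter out all its occurrences and continue; otherwise return the head (alternative decomposition).

-- ===== PORT A =====
-- builds the count dict, then scans its items for the first value 1
def find_one (A : List Int) : Option Int :=
  let num_count : PySem.Dict Int Int :=
    A.foldl (fun d x => if d.contains x then d.insert x (d.getD x 0 + 1) else d.insert x 1)
      PySem.Dict.empty
  (num_count.items.find? (fun kv => kv.2 == 1)).map Prod.fst

-- ===== PORT B =====
-- the while loop of Source B as recursion on the (strictly shrinking) list
def find_one_alt (A : List Int) : Option Int :=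
  match A with
  | [] => none
  | x :: rest =>
    if x ∉ rest then some x
    else find_one_alt (rest.filter (fun y => y ≠ x))
termination_by A.length
decreasing_by
  simp only [List.length_unattach, List.length_cons]
  exact Nat.lt_succ_of_le (le_trans (List.length_filter_le _ _) (by simp))

-- ===== PRECONDITION & SPEC =====
def Spec_find_one (A : List Int) (out : Option Int) : Prop := out = find_one_alt A
instance (A : List Int) (out : Option Int) : Decidable (Spec_find_one A out) := by unfold Spec_find_one; infer_instance

-- ===== CLAIM (what is proved, stated in full; the proofs are below) =====
def Claim_equal_find_one : Prop := ∀ (A : List Int), Dom_find_one A → Spec_find_one A (find_one A)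

-- ===== LEMMAS AND PROOFS =====

-- A's loop body extensionally equals the canonical counter step
theorem find_one_fold_eq_counter (A : List Int) :
    A.foldl (fun d x => if d.contains x then d.insert x (d.getD x 0 + 1) else d.insert x 1)
      PySem.Dict.empty = PySem.Dict.counter A := by
  rw [← PySem.Dict.foldl_insert_getD_add_one_eq_counter]
  congr 1
  funext d x
  by_cases h : d.contains x
  · simp [h]
  · have hn : d.get? x = none := by
      rw [PySem.Dict.get?_eq_none_iff_contains]
      simpa using h
    simp [h, PySem.Dict.getD, hn]

-- find? commutes with the first-occurrence dedup done by PySem.Set.ofList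
theorem find?_foldl_add (p : Int → Bool) (xs : List Int) :
    ∀ s : PySem.Set Int,
      List.find? p (xs.foldl PySem.Set.add s) = (List.find? p s).or (List.find? p xs) := by
  induction xs with
  | nil => intro s; simp
  | cons x xs ih =>
    intro s
    simp only [List.foldl_cons, ih]
    by_cases h : PySem.Set.contains s x
    · have hx : x ∈ s := by
        simpa [PySem.Set.contains] using h
      rw [PySem.Set.add, if_pos h]
      cases hs : List.find? p s with
      | some y => rfl
      | none =>
        have hpx : p x = false := by
          have := List.find?_eq_none.mp hs x hx
          simpa using this
        simp [hpx]
    · rw [PySem.Set.add, if_neg h, List.find?_append]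
      cases hs : List.find? p s with
      | some y => rfl
      | none =>
        cases hpx : p x <;> simp [hpx]

theorem find?_ofList (p : Int → Bool) (xs : List Int) :
    List.find? p (PySem.Set.ofList xs) = List.find? p xs := by
  have := find?_foldl_add p xs PySem.Set.empty
  simpa [PySem.Set.ofList, PySem.Set.empty] using this

-- A returns the first element of A whose count in A is 1
theorem find_one_eq_find? (A : List Int) :
    find_one A = List.find? (fun y => A.count y == 1) A := by
  unfold find_one
  simp only [find_one_fold_eq_counter, PySem.Dict.items_counter, List.find?_map]
  have hpred : ((fun kv : Int × Int => kv.2 == 1) ∘ fun k => (k, (List.count k A : Int)))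
      = fun y => A.count y == 1 := by
    funext k
    simp [Function.comp, List.count_eq_countP]
  rw [hpred, find?_ofList]
  cases List.find? (fun y => A.count y == 1) A <;> rfl

-- find? is preserved by filtering, provided dropped elements fail p and kept ones have p = q
theorem find?_filter_congr (p q r : Int → Bool) (xs : List Int)
    (h : ∀ y ∈ xs, (r y = false → p y = false) ∧ (r y = true → p y = q y)) :
    List.find? p xs = List.find? q (xs.filter r) := by
  induction xs with
  | nil => simp
  | cons x xs ih =>
    have hx := h x (List.mem_cons_self)
    have ih' := ih (fun y hy => h y (List.mem_cons_of_mem _ hy))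
    cases hr : r x with
    | false =>
      have hpx := hx.1 hr
      simp [List.filter_cons, hr, List.find?_cons, hpx, ih']
    | true =>
      have hpq := hx.2 hr
      simp only [List.filter_cons, hr, if_true, List.find?_cons, ← hpq]
      cases hpx : p x
      · exact ih'
      · rfl

-- B also returns the first element whose count is 1
theorem find_one_alt_eq_find?_aux (n : ℕ) :
    ∀ (A : List Int), A.length ≤ n → find_one_alt A = List.find? (fun y => A.count y == 1) A := by
  induction n with
  | zero =>
    intro A hA
    have : A = [] := List.eq_nil_of_length_eq_zero (Nat.le_zero.mp hA)
    subst this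
    simp [find_one_alt]
  | succ n ihn =>
    intro A hA
    match A with
    | [] => simp [find_one_alt]
    | x :: rest =>
    by_cases hx : x ∈ rest
    case neg =>
      -- head is unique
      rw [find_one_alt]
      have hc : List.count x rest = 0 := List.count_eq_zero.mpr hx
      simp [List.count_cons, hc, hx]
    case pos =>
    -- head repeats: peel it off
    rw [find_one_alt, if_neg (by simpa using hx)]
    have hlen : (rest.filter (fun y => y ≠ x)).length ≤ n := by
      have := List.length_filter_le (fun y => decide (y ≠ x)) rest
      simp only [List.length_cons] at hA
      omega
    rw [ihn _ hlen]
    have hcx : (x :: rest).count x ≥ 2 := by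
      have : 1 ≤ rest.count x := List.count_pos_iff.mpr (by simpa using hx)
      simp [List.count_cons]
      omega
    have hstep : List.find? (fun y => (x :: rest).count y == 1) (x :: rest)
        = List.find? (fun y => (x :: rest).count y == 1) rest := by
      have h0 : (List.count x rest == 0) = false := by
        simp only [beq_eq_false_iff_ne]
        have := List.count_pos_iff.mpr hx
        omega
      simp [List.find?_cons, List.count_cons, h0]
    rw [hstep]
    symm
    apply find?_filter_congr _ _ (fun y => y ≠ x)
    intro y hy
    constructor
    · intro hr
      have hyx : y = x := by simpa using hr
      subst hyx
      simp only [beq_eq_false_iff_ne]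
      omega
    · intro hr
      have hyx : y ≠ x := by simpa using hr
      have hcy : (x :: rest).count y = (rest.filter (fun z => z ≠ x)).count y := by
        rw [List.count_filter (by simp [hyx])]
        simp [List.count_cons, hyx, Ne.symm hyx]
      simp [hcy]

theorem find_one_alt_eq_find? (A : List Int) :
    find_one_alt A = List.find? (fun y => A.count y == 1) A :=
  find_one_alt_eq_find?_aux A.length A le_rfl

-- ===== VERDICT (by name: the statement is the Claim_ definition above) =====
theorem find_one_spec : Claim_equal_find_one := by
  intro A _
  unfold Spec_find_one
  rw [find_one_eq_find?, find_one_alt_eq_find?]
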